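-- pv_equiv track=rewrite | github.com/LKS-CHART/CHARTextract | datahandler/preprocessors.py | convert_repeated_data_to_sublist
-- ===== SOURCE A (Python) =====
-- def convert_repeated_data_to_sublist(repeated_ids, repeated_data=None, repeated_labels=None):
--     repeated_dict = {}
--     repeated_ids_list = []
--
--     if repeated_data is None:
--         repeated_data = [None]*len(repeated_ids)
--
--     if repeated_labels is None:
--         repeated_labels = [None]*len(repeated_ids)
--
--     for repeated_id, repeated_label, repeated_datum in zip(repeated_ids, repeated_labels, repeated_data):
--         if repeated_id not in repeated_dict:
--             repeated_dict[repeated_id] = {"data": [], "labels": []}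
--             repeated_dict[repeated_id]["data"] = [repeated_datum]
--             repeated_dict[repeated_id]["labels"] = [repeated_label]
--             repeated_ids_list.append(repeated_id)
--         else:
--             repeated_dict[repeated_id]["data"].append(repeated_datum)
--             repeated_dict[repeated_id]["labels"].append(repeated_label)
--
--     repeated_data_list = [repeated_dict[unique_id]["data"] for unique_id in repeated_ids_list]
--     repeated_labels_list = [repeated_dict[unique_id]["labels"] for unique_id in repeated_ids_list]
--
--     return repeated_ids_list, repeated_data_list, repeated_labels_list
-- ===== SOURCE B (Python) =====
-- def convert_repeated_data_to_sublist(repeated_ids, repeated_data=None, repeated_labels=None):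
--     if repeated_data is None:
--         repeated_data = [None] * len(repeated_ids)
--     if repeated_labels is None:
--         repeated_labels = [None] * len(repeated_ids)
--     m = min(len(repeated_ids), len(repeated_data), len(repeated_labels))
--     ids = repeated_ids[:m]
--     uniq = list(dict.fromkeys(ids))
--     data_list = [[d for j, d in zip(ids, repeated_data) if j == u] for u in uniq]
--     labels_list = [[l for j, l in zip(ids, repeated_labels) if j == u] for u in uniq]
--     return uniq, data_list, labels_list
-- ===== Notes on version B (the rewrite author's own statement) =====
-- stated objective: simpler
-- what changed: Replaces A's incrementally grown dict-of-dicts plus final lookup comprehensions by an ordered dedup of the zip-truncated ids followed by one filtering comprehension per unique id over the zipped (id, value) pairs.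
import Mathlib
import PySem

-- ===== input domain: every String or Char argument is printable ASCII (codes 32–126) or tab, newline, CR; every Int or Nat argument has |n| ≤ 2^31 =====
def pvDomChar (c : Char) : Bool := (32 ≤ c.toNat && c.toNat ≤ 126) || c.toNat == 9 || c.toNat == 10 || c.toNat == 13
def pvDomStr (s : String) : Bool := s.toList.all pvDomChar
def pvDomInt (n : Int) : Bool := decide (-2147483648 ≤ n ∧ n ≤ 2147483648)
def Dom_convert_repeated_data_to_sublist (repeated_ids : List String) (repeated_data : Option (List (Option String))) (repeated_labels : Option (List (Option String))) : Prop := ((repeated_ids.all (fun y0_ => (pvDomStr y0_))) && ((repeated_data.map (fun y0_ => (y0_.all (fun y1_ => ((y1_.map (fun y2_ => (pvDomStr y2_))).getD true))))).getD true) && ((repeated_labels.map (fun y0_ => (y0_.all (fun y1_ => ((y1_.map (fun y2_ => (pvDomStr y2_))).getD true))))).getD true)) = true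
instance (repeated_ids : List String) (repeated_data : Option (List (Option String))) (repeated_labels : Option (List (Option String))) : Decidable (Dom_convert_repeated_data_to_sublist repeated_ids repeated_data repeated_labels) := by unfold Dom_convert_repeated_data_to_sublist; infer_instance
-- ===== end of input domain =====

-- B replaces A's incrementally-grown dict-of-dicts and final lookup comprehensions by an
-- ordered dedup of the (zip-truncated) ids followed by one filtering comprehension per unique
-- id over the zipped pairs (objective: simpler).

-- ===== PORT A =====
-- state: (the dict id ↦ (data sublist, labels sublist), repeated_ids_list)
def convert_repeated_data_to_sublist (repeated_ids : List String) (repeated_data : Option (List (Option String))) (repeated_labels : Option (List (Option String))) : List String × List (List (Option String)) × List (List (Option String)) :=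
  let data := repeated_data.getD (repeated_ids.map (fun _ => none))
  let labels := repeated_labels.getD (repeated_ids.map (fun _ => none))
  -- for repeated_id, repeated_label, repeated_datum in zip(repeated_ids, repeated_labels, repeated_data)
  let st := (repeated_ids.zip (labels.zip data)).foldl
    (fun (st : PySem.Dict String (List (Option String) × List (Option String)) × List String) z =>
      if st.1.contains z.1 then
        -- dict[id]["data"].append(datum); dict[id]["labels"].append(label)
        (st.1.modify z.1 ([], []) (fun p => (p.1 ++ [z.2.2], p.2 ++ [z.2.1])), st.2)
      else
        -- dict[id] = {...}; dict[id]["data"] = [datum]; dict[id]["labels"] = [label]  (net effect)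
        (st.1.insert z.1 ([z.2.2], [z.2.1]), st.2 ++ [z.1]))
    (PySem.Dict.empty, [])
  -- the two final comprehensions; repeated_dict[unique_id] never misses (id was inserted)
  let repeated_data_list := st.2.map (fun u => ((st.1.get? u).getD ([], [])).1)
  let repeated_labels_list := st.2.map (fun u => ((st.1.get? u).getD ([], [])).2)
  (st.2, repeated_data_list, repeated_labels_list)

-- ===== PORT B =====
def convert_repeated_data_to_sublist_alt (repeated_ids : List String) (repeated_data : Option (List (Option String))) (repeated_labels : Option (List (Option String))) : List String × List (List (Option String)) × List (List (Option String)) :=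
  let data := repeated_data.getD (repeated_ids.map (fun _ => none))
  let labels := repeated_labels.getD (repeated_ids.map (fun _ => none))
  let m := min (min repeated_ids.length data.length) labels.length
  let ids := repeated_ids.take m
  let uniq := PySem.List.dedup ids          -- list(dict.fromkeys(ids))
  let data_list := uniq.map (fun u => ((ids.zip data).filter (fun p => p.1 == u)).map (·.2))
  let labels_list := uniq.map (fun u => ((ids.zip labels).filter (fun p => p.1 == u)).map (·.2))
  (uniq, data_list, labels_list)

-- ===== PRECONDITION & SPEC =====
def Spec_convert_repeated_data_to_sublist (repeated_ids : List String) (repeated_data : Option (List (Option String))) (repeated_labels : Option (List (Option String))) (out : List String × List (List (Option String)) × List (List (Option String))) : Prop := out = convert_repeated_data_to_sublist_alt repeated_ids repeated_data repeated_labels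
instance (repeated_ids : List String) (repeated_data : Option (List (Option String))) (repeated_labels : Option (List (Option String))) (out : List String × List (List (Option String)) × List (List (Option String))) : Decidable (Spec_convert_repeated_data_to_sublist repeated_ids repeated_data repeated_labels out) := by unfold Spec_convert_repeated_data_to_sublist; infer_instance

-- ===== CLAIM (what is proved, stated in full; the proofs are below) =====
def Claim_equal_convert_repeated_data_to_sublist : Prop := ∀ (repeated_ids : List String) (repeated_data : Option (List (Option String))) (repeated_labels : Option (List (Option String))), Dom_convert_repeated_data_to_sublist repeated_ids repeated_data repeated_labels → Spec_convert_repeated_data_to_sublist repeated_ids repeated_data repeated_labels (convert_repeated_data_to_sublist repeated_ids repeated_data repeated_labels)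

-- ===== LEMMAS AND PROOFS =====

-- the dict-only step of A's loop, written as a single modify
def pvStepD (d : PySem.Dict String (List (Option String) × List (Option String)))
    (z : String × Option String × Option String) :
    PySem.Dict String (List (Option String) × List (Option String)) :=
  d.modify z.1 ([], []) (fun p => (p.1 ++ [z.2.2], p.2 ++ [z.2.1]))

-- A's loop, run with invariant acc = d.keys, yields (final dict, its keys)
lemma pv_loop_char : ∀ (zs : List (String × Option String × Option String))
    (d : PySem.Dict String (List (Option String) × List (Option String))) (acc : List String),
    acc = d.keys →
    zs.foldl
      (fun (st : PySem.Dict String (List (Option String) × List (Option String)) × List String) z =>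
        if st.1.contains z.1 then
          (st.1.modify z.1 ([], []) (fun p => (p.1 ++ [z.2.2], p.2 ++ [z.2.1])), st.2)
        else
          (st.1.insert z.1 ([z.2.2], [z.2.1]), st.2 ++ [z.1])) (d, acc)
    = (zs.foldl pvStepD d, (zs.foldl pvStepD d).keys) := by
  intro zs
  induction zs with
  | nil => intro d acc h; simpa using h
  | cons z zs ih =>
    intro d acc h
    by_cases hc : d.contains z.1 = true
    · have hkeys : (pvStepD d z).keys = d.keys := by
        rw [pvStepD, PySem.Dict.keys_modify]
        exact PySem.Dict.keys_insert_of_contains d _ hc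
      simp only [List.foldl_cons, hc, if_true]
      rw [show (d.modify z.1 ([], []) (fun p => (p.1 ++ [z.2.2], p.2 ++ [z.2.1])), acc)
            = (pvStepD d z, (pvStepD d z).keys) by rw [hkeys, ← h]; rfl]
      exact ih _ _ rfl
    · have hc' : d.contains z.1 = false := by simpa using hc
      have hgd : d.getD z.1 ([], []) = ([], []) :=
        PySem.Dict.getD_of_not_contains d ([], []) hc'
      have hins : d.insert z.1 ([z.2.2], [z.2.1]) = pvStepD d z := by
        simp [pvStepD, PySem.Dict.modify, hgd]
      have hkeys : (pvStepD d z).keys = d.keys ++ [z.1] := by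
        rw [← hins]; exact PySem.Dict.keys_insert_of_not_contains d _ hc'
      rw [List.foldl_cons, if_neg (by simp [hc'])]
      rw [show (d.insert z.1 ([z.2.2], [z.2.1]), acc ++ [z.1])
            = (pvStepD d z, (pvStepD d z).keys) by rw [hins, hkeys, ← h]]
      exact ih _ _ rfl

-- grouping characterisation of the final dict
lemma pv_grp (c : String) : ∀ (zs : List (String × Option String × Option String))
    (d : PySem.Dict String (List (Option String) × List (Option String))),
    (zs.foldl pvStepD d).getD c ([], [])
    = ((d.getD c ([], [])).1 ++ (zs.filter (fun z => z.1 == c)).map (·.2.2),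
       (d.getD c ([], [])).2 ++ (zs.filter (fun z => z.1 == c)).map (·.2.1)) := by
  intro zs
  induction zs with
  | nil => intro d; simp
  | cons z zs ih =>
    intro d
    rw [List.foldl_cons, ih]
    by_cases hzc : z.1 = c
    · subst hzc
      simp [pvStepD]
    · have hcz : ¬ c = z.1 := fun h => hzc h.symm
      simp [pvStepD, PySem.Dict.getD_modify, hzc, hcz]

-- keys of the final dict: ordered dedup of the first components
lemma pv_keys (zs : List (String × Option String × Option String))
    (d : PySem.Dict String (List (Option String) × List (Option String))) :
    (zs.foldl pvStepD d).keys = PySem.Set.update d.keys (zs.map (·.1)) :=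
  PySem.Dict.keys_foldl_modify_key zs (·.1) ([], [])
    (fun _ z p => (p.1 ++ [z.2.2], p.2 ++ [z.2.1])) d

-- projecting the 3-zip onto (id, datum) / (id, label) gives the 2-zips of B
lemma pv_zip3_proj2 {α β γ : Type} : ∀ (as : List α) (bs : List β) (cs : List γ),
    (as.zip (bs.zip cs)).map (fun z => (z.1, z.2.2))
      = (as.take (min as.length (min bs.length cs.length))).zip cs := by
  intro as
  induction as with
  | nil => intro bs cs; simp
  | cons a as ih =>
    intro bs cs
    cases bs with
    | nil => simp
    | cons b bs =>
      cases cs with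
      | nil => simp
      | cons c cs => simp [Nat.succ_min_succ, ih bs cs]

lemma pv_zip3_proj1 {α β γ : Type} : ∀ (as : List α) (bs : List β) (cs : List γ),
    (as.zip (bs.zip cs)).map (fun z => (z.1, z.2.1))
      = (as.take (min as.length (min bs.length cs.length))).zip bs := by
  intro as
  induction as with
  | nil => intro bs cs; simp
  | cons a as ih =>
    intro bs cs
    cases bs with
    | nil => simp
    | cons b bs =>
      cases cs with
      | nil => simp
      | cons c cs => simp [Nat.succ_min_succ, ih bs cs]

-- filtered projection of the 3-zip = B's filtered 2-zip
lemma pv_filter_proj {α β γ δ : Type} [BEq α] (u : α)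
    (zs : List (α × β × γ)) (l : List (α × δ)) (proj : β × γ → δ)
    (h : zs.map (fun z => (z.1, proj z.2)) = l) :
    (l.filter (fun p => p.1 == u)).map (·.2)
      = (zs.filter (fun z => z.1 == u)).map (fun z => proj z.2) := by
  subst h
  rw [List.filter_map, List.map_map]
  rfl

-- the core equality on the plain (already defaulted) lists
lemma pv_core (rids : List String) (data labels : List (Option String)) :
    (((rids.zip (labels.zip data)).foldl
      (fun (st : PySem.Dict String (List (Option String) × List (Option String)) × List String) z =>
        if st.1.contains z.1 then
          (st.1.modify z.1 ([], []) (fun p => (p.1 ++ [z.2.2], p.2 ++ [z.2.1])), st.2)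
        else
          (st.1.insert z.1 ([z.2.2], [z.2.1]), st.2 ++ [z.1])) (PySem.Dict.empty, [])).2,
     ((rids.zip (labels.zip data)).foldl
      (fun (st : PySem.Dict String (List (Option String) × List (Option String)) × List String) z =>
        if st.1.contains z.1 then
          (st.1.modify z.1 ([], []) (fun p => (p.1 ++ [z.2.2], p.2 ++ [z.2.1])), st.2)
        else
          (st.1.insert z.1 ([z.2.2], [z.2.1]), st.2 ++ [z.1])) (PySem.Dict.empty, [])).2.map
        (fun u => ((((rids.zip (labels.zip data)).foldl
          (fun (st : PySem.Dict String (List (Option String) × List (Option String)) × List String) z =>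
            if st.1.contains z.1 then
              (st.1.modify z.1 ([], []) (fun p => (p.1 ++ [z.2.2], p.2 ++ [z.2.1])), st.2)
            else
              (st.1.insert z.1 ([z.2.2], [z.2.1]), st.2 ++ [z.1])) (PySem.Dict.empty, [])).1.get? u).getD ([], [])).1),
     ((rids.zip (labels.zip data)).foldl
      (fun (st : PySem.Dict String (List (Option String) × List (Option String)) × List String) z =>
        if st.1.contains z.1 then
          (st.1.modify z.1 ([], []) (fun p => (p.1 ++ [z.2.2], p.2 ++ [z.2.1])), st.2)
        else
          (st.1.insert z.1 ([z.2.2], [z.2.1]), st.2 ++ [z.1])) (PySem.Dict.empty, [])).2.map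
        (fun u => ((((rids.zip (labels.zip data)).foldl
          (fun (st : PySem.Dict String (List (Option String) × List (Option String)) × List String) z =>
            if st.1.contains z.1 then
              (st.1.modify z.1 ([], []) (fun p => (p.1 ++ [z.2.2], p.2 ++ [z.2.1])), st.2)
            else
              (st.1.insert z.1 ([z.2.2], [z.2.1]), st.2 ++ [z.1])) (PySem.Dict.empty, [])).1.get? u).getD ([], [])).2))
    = (PySem.List.dedup (rids.take (min (min rids.length data.length) labels.length)),
       (PySem.List.dedup (rids.take (min (min rids.length data.length) labels.length))).map
         (fun u => (((rids.take (min (min rids.length data.length) labels.length)).zip data).filter (fun p => p.1 == u)).map (·.2)),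
       (PySem.List.dedup (rids.take (min (min rids.length data.length) labels.length))).map
         (fun u => (((rids.take (min (min rids.length data.length) labels.length)).zip labels).filter (fun p => p.1 == u)).map (·.2))) := by
  set zs := rids.zip (labels.zip data) with hzs
  set m := min (min rids.length data.length) labels.length with hm
  set ids := rids.take m with hids
  have hM : min rids.length (min labels.length data.length) = m := by omega
  have hlenids : ids.length = m := by rw [hids, List.length_take]; omega
  have hproj2 : zs.map (fun z => (z.1, z.2.2)) = ids.zip data := by
    have h := pv_zip3_proj2 rids labels data
    rw [hM] at h; rw [hzs, hids]; exact h
  have hproj1 : zs.map (fun z => (z.1, z.2.1)) = ids.zip labels := by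
    have h := pv_zip3_proj1 rids labels data
    rw [hM] at h; rw [hzs, hids]; exact h
  have hfst : zs.map (·.1) = ids := by
    have h1 : zs.map (·.1) = (ids.zip data).map Prod.fst := by
      rw [← hproj2, List.map_map]; rfl
    rw [h1, List.map_fst_zip]
    rw [hlenids]; omega
  rw [pv_loop_char zs PySem.Dict.empty [] (by simp)]
  have hkeys : (zs.foldl pvStepD PySem.Dict.empty).keys = PySem.List.dedup ids := by
    rw [pv_keys, PySem.Dict.keys_empty, hfst, PySem.Set.update_nil_left,
        PySem.List.dedup_eq_ofList]
  simp only [hkeys, Prod.mk.injEq]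
  refine ⟨trivial, ?_, ?_⟩
  · apply List.map_congr_left
    intro u _
    rw [← PySem.Dict.getD_eq_get?_getD, pv_grp u zs PySem.Dict.empty,
        pv_filter_proj u zs (ids.zip data) (·.2) hproj2]
    simp
  · apply List.map_congr_left
    intro u _
    rw [← PySem.Dict.getD_eq_get?_getD, pv_grp u zs PySem.Dict.empty,
        pv_filter_proj u zs (ids.zip labels) (·.1) hproj1]
    simp

-- ===== VERDICT (by name: the statement is the Claim_ definition above) =====
theorem convert_repeated_data_to_sublist_spec : Claim_equal_convert_repeated_data_to_sublist := by
  intro rids rdata rlabels _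
  unfold Spec_convert_repeated_data_to_sublist
  simp only [convert_repeated_data_to_sublist, convert_repeated_data_to_sublist_alt]
  exact pv_core rids (rdata.getD (rids.map (fun _ => none))) (rlabels.getD (rids.map (fun _ => none)))
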